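-- pv_equiv track=rewrite | github.com/gtklocker/projecteuler | 0114.py | solve
-- ===== SOURCE A (Python) =====
-- def solve(n, m):
--     dp = [[0] * (n + 1) for i in range(2)]
--     dp[0][0] = 1
--
--     for i in range(1, n + 1):
--         if i - 1 >= 0:
--             dp[0][i] = dp[0][i - 1] + dp[1][i - 1]
--             dp[1][i] = dp[1][i - 1]
--         if i - m >= 0:
--             dp[1][i] += dp[0][i - m]
--
--     return dp[0][n] + dp[1][n]
-- ===== SOURCE B (Python) =====
-- def solve(n, m):
--     # Collapsed order-(m+1) linear recurrence on the single totals sequence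
--     # F(i) = F(total fillings of length i): F(i) = 2*F(i-1) - F(i-2) + F(i-m-1),
--     # where F(j) = 1 for j < 0; derived by eliminating both DP rows.
--     F = [0] * (n + 1)
--     F[0] = 1
--     for i in range(1, n + 1):
--         prev2 = F[i - 2] if i - 2 >= 0 else 1
--         tail = (F[i - m - 1] if i - m - 1 >= 0 else 1) if i - m >= 0 else 0
--         F[i] = 2 * F[i - 1] - prev2 + tail
--     return F[n]
-- ===== Notes on version B (the rewrite author's own statement) =====
-- stated objective: alternative
-- what changed: Eliminates both DP rows algebraically and fills a single sequence by the collapsed linear recurrence F(i) = 2*F(i-1) - F(i-2) + F(i-m-1) (with F = 1 below index 0), instead of A's two-state table where one row sums the other.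
import Mathlib
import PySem

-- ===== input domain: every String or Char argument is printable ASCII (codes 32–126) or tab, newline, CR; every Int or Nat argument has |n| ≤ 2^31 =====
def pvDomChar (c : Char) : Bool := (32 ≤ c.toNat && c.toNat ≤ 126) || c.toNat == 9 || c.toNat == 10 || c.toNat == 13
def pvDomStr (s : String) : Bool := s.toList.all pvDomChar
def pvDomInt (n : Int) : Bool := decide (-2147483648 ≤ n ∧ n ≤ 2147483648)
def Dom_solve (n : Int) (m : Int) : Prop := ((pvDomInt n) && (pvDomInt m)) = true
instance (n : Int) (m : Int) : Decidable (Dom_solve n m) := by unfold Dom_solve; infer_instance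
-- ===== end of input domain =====

-- B replaces A's two-row DP table by a single sequence filled with the collapsed
-- linear recurrence F(i) = 2F(i-1) - F(i-2) + F(i-m-1) (F = 1 below 0): same O(n) cost, different algorithm.


-- ===== PORT A =====
-- Python rows are arrays, so each row is an Array Int (O(1) get/set like Python's list).
-- Loop body of A: state is the pair of rows (dp[0], dp[1]).
-- Under Pre_solve every index A reads/writes is in range, so getD/setIfInBounds are exact.
def solveStep (m : Int) (st : Array Int × Array Int) (i : Int) : Array Int × Array Int :=
  let st1 :=
    if i - 1 ≥ 0 then
      (st.1.setIfInBounds i.toNat (st.1.getD (i-1).toNat 0 + st.2.getD (i-1).toNat 0),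
       st.2.setIfInBounds i.toNat (st.2.getD (i-1).toNat 0))
    else st
  if i - m ≥ 0 then
    (st1.1, st1.2.setIfInBounds i.toNat (st1.2.getD i.toNat 0 + st1.1.getD (i-m).toNat 0))
  else st1

def solve (n : Int) (m : Int) : Int :=
  let len := (n + 1).toNat
  let d0 := (Array.replicate len (0 : Int)).setIfInBounds 0 1
  let d1 := Array.replicate len (0 : Int)
  let r := (PySem.List.pyRange 1 (n + 1) 1).foldl (solveStep m) (d0, d1)
  r.1.getD n.toNat 0 + r.2.getD n.toNat 0

-- ===== PORT B =====
-- Loop body of B: state is the single sequence F, filled by the collapsed recurrence.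
def solveAltStep (m : Int) (F : Array Int) (i : Int) : Array Int :=
  let prev2 := if i - 2 ≥ 0 then F.getD (i-2).toNat 0 else 1
  let tail := if i - m ≥ 0 then (if i - m - 1 ≥ 0 then F.getD (i-m-1).toNat 0 else 1) else 0
  F.setIfInBounds i.toNat (2 * F.getD (i-1).toNat 0 - prev2 + tail)

def solve_alt (n : Int) (m : Int) : Int :=
  let len := (n + 1).toNat
  let F0 := (Array.replicate len (0 : Int)).setIfInBounds 0 1
  let r := (PySem.List.pyRange 1 (n + 1) 1).foldl (solveAltStep m) F0
  r.getD n.toNat 0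

-- ===== PRECONDITION & SPEC =====
-- A raises IndexError when n < 0 (dp rows are empty, dp[0][0] fails) and when
-- m < 0 with n ≥ 1 (dp[0][i-m] reaches past the row at i = n); Pre_ excludes exactly those.
def Pre_solve (n : Int) (m : Int) : Prop := 0 ≤ n ∧ (0 ≤ m ∨ n = 0)
instance (n : Int) (m : Int) : Decidable (Pre_solve n m) := by unfold Pre_solve; infer_instance
def pvWitness_solve : Int × Int := (7, 3)
def Spec_solve (n : Int) (m : Int) (out : Int) : Prop := out = solve_alt n m
instance (n : Int) (m : Int) (out : Int) : Decidable (Spec_solve n m out) := by unfold Spec_solve; infer_instance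

-- ===== CLAIM (what is proved, stated in full; the proofs are below) =====
def Claim_equal_solve : Prop := ∀ (n : Int) (m : Int), Dom_solve n m → Pre_solve n m → Spec_solve n m (solve n m)

-- ===== LEMMAS AND PROOFS =====

theorem getD_setIfInBounds_self (a : Array Int) (i : Nat) (v : Int) (h : i < a.size) :
    (a.setIfInBounds i v).getD i 0 = v := by
  simp [Array.getD, h]

theorem getD_setIfInBounds_ne (a : Array Int) (i j : Nat) (v : Int) (h : j ≠ i) :
    (a.setIfInBounds i v).getD j 0 = a.getD j 0 := by
  by_cases hj : j < a.size
  · simp [Array.getD, hj, Ne.symm h]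
  · simp [Array.getD, hj]

-- Invariant after processing i = 1..k: rows have the right sizes, dp[0][0] stays 1,
-- B's F[j] is the row total dp[0][j] + dp[1][j] for j ≤ k, and dp[0][j] = F[j-1] for 1 ≤ j ≤ k.
def pvInv (len k : Nat) (a : Array Int × Array Int) (b : Array Int) : Prop :=
  a.1.size = len ∧ a.2.size = len ∧ b.size = len ∧
  a.1.getD 0 0 = 1 ∧
  (∀ j : Nat, j ≤ k → a.1.getD j 0 + a.2.getD j 0 = b.getD j 0) ∧
  (∀ j : Nat, 1 ≤ j → j ≤ k → a.1.getD j 0 = b.getD (j-1) 0)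

theorem inv_step (len k : Nat) (m : Int) (hm : 0 ≤ m)
    (a : Array Int × Array Int) (b : Array Int)
    (hlt : k + 1 < len) (h : pvInv len k a b) :
    pvInv len (k + 1) (solveStep m a ((k : Int) + 1)) (solveAltStep m b ((k : Int) + 1)) := by
  obtain ⟨hs1, hs2, hs3, h0, hsum, hshift⟩ := h
  have hi1 : (((k : Int) + 1) - 1).toNat = k := by omega
  have hiN : ((k : Int) + 1).toNat = k + 1 := by omega
  have hk1 : k + 1 < a.1.size := by omega
  have hk2 : k + 1 < a.2.size := by omega
  have hkb : k + 1 < b.size := by omega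
  -- named pieces
  set A1 := a.1.setIfInBounds (k+1) (a.1.getD k 0 + a.2.getD k 0) with hA1
  set A2 := a.2.setIfInBounds (k+1) (a.2.getD k 0) with hA2
  have hA1size : A1.size = len := by simp [hA1, hs1]
  have hA2size : A2.size = len := by simp [hA2, hs2]
  have hA1k1 : A1.getD (k+1) 0 = a.1.getD k 0 + a.2.getD k 0 :=
    getD_setIfInBounds_self _ _ _ hk1
  have hA2k1 : A2.getD (k+1) 0 = a.2.getD k 0 :=
    getD_setIfInBounds_self _ _ _ hk2
  have hA1ne : ∀ j : Nat, j ≠ k + 1 → A1.getD j 0 = a.1.getD j 0 := fun j hj =>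
    getD_setIfInBounds_ne _ _ _ _ hj
  have hA2ne : ∀ j : Nat, j ≠ k + 1 → A2.getD j 0 = a.2.getD j 0 := fun j hj =>
    getD_setIfInBounds_ne _ _ _ _ hj
  -- B's new value
  set prev2 : Int := if ((k : Int) + 1) - 2 ≥ 0 then b.getD (((k : Int) + 1 - 2)).toNat 0 else 1 with hprev2
  set tl : Int := if ((k : Int) + 1) - m ≥ 0 then
      (if ((k : Int) + 1) - m - 1 ≥ 0 then b.getD (((k : Int) + 1 - m - 1)).toNat 0 else 1) else 0 with htl
  have hBstep : solveAltStep m b ((k : Int) + 1)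
      = b.setIfInBounds (k+1) (2 * b.getD k 0 - prev2 + tl) := by
    simp only [solveAltStep, hi1, hiN, ← hprev2, ← htl]
  -- value relations
  have hvalk : a.1.getD k 0 + a.2.getD k 0 = b.getD k 0 := hsum k (by omega)
  have hd0k : a.1.getD k 0 = prev2 := by
    rcases Nat.eq_zero_or_pos k with hk0 | hkpos
    · subst hk0; rw [hprev2, if_neg (by omega)]; exact h0
    · rw [hprev2, if_pos (by omega)]
      have : (((k : Int) + 1 - 2)).toNat = k - 1 := by omega
      rw [this]; exact hshift k hkpos (le_refl k)
  -- A's step unfolds (guard i-1 ≥ 0 holds)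
  have hAstep : solveStep m a ((k : Int) + 1)
      = if ((k : Int) + 1) - m ≥ 0 then
          (A1, A2.setIfInBounds (k+1) (A2.getD (k+1) 0 + A1.getD (((k : Int) + 1 - m)).toNat 0))
        else (A1, A2) := by
    simp only [solveStep, if_pos (show ((k : Int) + 1) - 1 ≥ 0 by omega), hi1, hiN]
    rw [← hA1, ← hA2]
  -- the dp[0][i-m] value equals the tail term when the guard holds
  have htail : ((k : Int) + 1) - m ≥ 0 → A1.getD (((k : Int) + 1 - m)).toNat 0 = tl := by
    intro hg
    rw [htl, if_pos hg]
    by_cases hz : ((k : Int) + 1) - m - 1 ≥ 0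
    · -- index i - m ≥ 1
      rw [if_pos hz]
      by_cases hmm : m = 0
      · subst hmm
        have : (((k : Int) + 1 - 0)).toNat = k + 1 := by omega
        rw [this, hA1k1, hvalk]
        have : (((k : Int) + 1 - 0 - 1)).toNat = k := by omega
        rw [this]
      · have hm1 : 1 ≤ m := by omega
        have hidx : (((k : Int) + 1 - m)).toNat ≤ k := by omega
        have hne : (((k : Int) + 1 - m)).toNat ≠ k + 1 := by omega
        rw [hA1ne _ hne]
        have hpos : 1 ≤ (((k : Int) + 1 - m)).toNat := by omega
        have := hshift _ hpos hidx
        rw [this]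
        congr 1
        omega
    · -- index i - m = 0: dp[0][0] = 1
      rw [if_neg hz]
      have : (((k : Int) + 1 - m)).toNat = 0 := by omega
      rw [this, hA1ne 0 (by omega)]
      exact h0
  -- now prove the invariant for both guard cases
  rw [hAstep, hBstep]
  by_cases hg : ((k : Int) + 1) - m ≥ 0
  · rw [if_pos hg]
    refine ⟨hA1size, by simp [hA2size], by simp [hs3], ?_, ?_, ?_⟩
    · rw [hA1ne 0 (by omega)]; exact h0
    · intro j hj
      rcases Nat.lt_or_ge j (k+1) with hjk | hjk
      · have hne : j ≠ k + 1 := by omega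
        rw [hA1ne _ hne, getD_setIfInBounds_ne _ _ _ _ hne,
            hA2ne _ hne, getD_setIfInBounds_ne _ _ _ _ hne]
        exact hsum j (by omega)
      · have hj1 : j = k + 1 := by omega
        subst hj1
        rw [getD_setIfInBounds_self _ _ _ (by omega : k + 1 < A2.size),
            getD_setIfInBounds_self _ _ _ hkb,
            hA1k1, hA2k1, htail hg, ← hd0k, ← hvalk]
        ring
    · intro j hj1 hjk
      rcases Nat.lt_or_ge j (k+1) with hjk' | hjk'
      · have hne : j ≠ k + 1 := by omega
        rw [hA1ne _ hne, getD_setIfInBounds_ne _ _ _ _ (by omega : j - 1 ≠ k + 1)]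
        exact hshift j hj1 (by omega)
      · have hj1' : j = k + 1 := by omega
        subst hj1'
        rw [hA1k1, hvalk, getD_setIfInBounds_ne _ _ _ _ (by omega : k + 1 - 1 ≠ k + 1)]
        congr 1
  · rw [if_neg hg]
    refine ⟨hA1size, hA2size, by simp [hs3], ?_, ?_, ?_⟩
    · rw [hA1ne 0 (by omega)]; exact h0
    · intro j hj
      rcases Nat.lt_or_ge j (k+1) with hjk | hjk
      · have hne : j ≠ k + 1 := by omega
        rw [hA1ne _ hne, hA2ne _ hne, getD_setIfInBounds_ne _ _ _ _ hne]
        exact hsum j (by omega)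
      · have hj1 : j = k + 1 := by omega
        subst hj1
        have htl0 : tl = 0 := by rw [htl, if_neg hg]
        rw [getD_setIfInBounds_self _ _ _ hkb, hA1k1, hA2k1, htl0, ← hd0k, ← hvalk]
        ring
    · intro j hj1 hjk
      rcases Nat.lt_or_ge j (k+1) with hjk' | hjk'
      · have hne : j ≠ k + 1 := by omega
        rw [hA1ne _ hne, getD_setIfInBounds_ne _ _ _ _ (by omega : j - 1 ≠ k + 1)]
        exact hshift j hj1 (by omega)
      · have hj1' : j = k + 1 := by omega
        subst hj1'
        rw [hA1k1, hvalk, getD_setIfInBounds_ne _ _ _ _ (by omega : k + 1 - 1 ≠ k + 1)]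
        congr 1

theorem inv_fold (len : Nat) (m : Int) (hm : 0 ≤ m) (a : Array Int × Array Int) (b : Array Int)
    (h0 : pvInv len 0 a b) (j : Nat) (hj : j < len) :
    pvInv len j
      ((PySem.List.pyRange 1 (1 + (j : Int)) 1).foldl (solveStep m) a)
      ((PySem.List.pyRange 1 (1 + (j : Int)) 1).foldl (solveAltStep m) b) := by
  induction j with
  | zero =>
    simpa [PySem.List.pyRange_one_eq_nil (by omega : (1:Int) + 0 ≤ 1)] using h0
  | succ j ih =>
    have hsplit : PySem.List.pyRange 1 (1 + ((j : Int) + 1)) 1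
        = PySem.List.pyRange 1 (1 + (j : Int)) 1 ++ [1 + (j : Int)] := by
      have := PySem.List.pyRange_one_succ_right (a := 1) (b := 1 + (j : Int)) (by omega)
      rw [show (1 : Int) + ((j : Int) + 1) = 1 + (j : Int) + 1 by ring, this]
    have hcast : ((1 : Int) + (j : Int)) = (j : Int) + 1 := by ring
    push_cast at hsplit ⊢
    rw [hsplit]
    simp only [List.foldl_append, List.foldl_cons, List.foldl_nil, hcast]
    have ih' := ih (by omega)
    rw [hcast] at ih'
    exact inv_step len j m hm _ _ (by omega) ih'

theorem solve_eq_alt (n m : Int) (hn : 0 ≤ n) (hm : 0 ≤ m ∨ n = 0) :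
    solve n m = solve_alt n m := by
  rcases hm with hm | hn0
  · simp only [solve, solve_alt]
    set len := (n + 1).toNat with hlen
    have hlen1 : 1 ≤ len := by omega
    have h0 : pvInv len 0
        ((Array.replicate len (0:Int)).setIfInBounds 0 1, Array.replicate len (0 : Int))
        ((Array.replicate len (0:Int)).setIfInBounds 0 1) := by
      have hg0 : ((Array.replicate len (0:Int)).setIfInBounds 0 1).getD 0 0 = 1 :=
        getD_setIfInBounds_self _ _ _ (by simp; omega)
      refine ⟨by simp, by simp, by simp, hg0, ?_, ?_⟩
      · intro j hj
        have hj0 : j = 0 := by omega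
        subst hj0
        simp only [hg0]
        simp [Array.getD]
      · intro j hj1 hj; omega
    have hfin := inv_fold len m hm _ _ h0 n.toNat (by omega)
    have hrw : (1 : Int) + (n.toNat : Int) = n + 1 := by omega
    rw [hrw] at hfin
    obtain ⟨_, _, _, _, hsum, _⟩ := hfin
    exact hsum n.toNat (le_refl _)
  · subst hn0
    simp [solve, solve_alt, PySem.List.pyRange_one_eq_nil (by omega : (1:Int) ≤ 1),
      Array.getD]

-- ===== VERDICT (by name: the statement is the Claim_ definition above) =====
theorem solve_spec : Claim_equal_solve := by
  intro n m _ hpre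
  exact solve_eq_alt n m hpre.1 hpre.2
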